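-- pv_equiv track=rewrite | github.com/zeriouslyzen/icebrg | src/iceburg/optimization/optimization_orchestrator.py | _prioritize_implementations
-- ===== SOURCE A (Python) =====
-- from typing import Dict, Any, List, Optional, Tuple
--
-- def _prioritize_implementations(recommendations: List[str]) -> List[str]:
--     """Prioritize implementation of recommendations"""
--
--     # Simple prioritization based on keywords and system impact
--     high_priority_keywords = ["critical", "high", "system", "performance", "efficiency"]
--     medium_priority_keywords = ["medium", "optimization", "improvement", "enhancement"]
--     low_priority_keywords = ["low", "fine-tune", "monitor", "analysis"]
--
--     prioritized = {
--         "high": [],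
--         "medium": [],
--         "low": []
--     }
--
--     for recommendation in recommendations:
--         recommendation_lower = recommendation.lower()
--
--         if any(keyword in recommendation_lower for keyword in high_priority_keywords):
--             prioritized["high"].append(recommendation)
--         elif any(keyword in recommendation_lower for keyword in medium_priority_keywords):
--             prioritized["medium"].append(recommendation)
--         elif any(keyword in recommendation_lower for keyword in low_priority_keywords):
--             prioritized["low"].append(recommendation)
--         else:
--             prioritized["medium"].append(recommendation)  # Default to medium
--
--     # Return prioritized list
--     return (prioritized["high"] + prioritized["medium"] + prioritized["low"])
-- ===== SOURCE B (Python) =====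
-- def _prioritize_implementations(recommendations):
--     """Prioritize implementation of recommendations"""
--     high_priority_keywords = ["critical", "high", "system", "performance", "efficiency"]
--     medium_priority_keywords = ["medium", "optimization", "improvement", "enhancement"]
--     low_priority_keywords = ["low", "fine-tune", "monitor", "analysis"]
--
--     def rank(recommendation):
--         recommendation_lower = recommendation.lower()
--         if any(keyword in recommendation_lower for keyword in high_priority_keywords):
--             return 0
--         if any(keyword in recommendation_lower for keyword in medium_priority_keywords):
--             return 1
--         if any(keyword in recommendation_lower for keyword in low_priority_keywords):
--             return 2
--         return 1  # default to medium
--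
--     return sorted(recommendations, key=rank)
-- ===== Notes on version B (the rewrite author's own statement) =====
-- stated objective: simpler
-- what changed: Replaces the three-bucket dict accumulation and concatenation with a single stable sort by a 0/1/2 priority rank function, relying on sort stability to keep the original order within each priority.
import Mathlib
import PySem

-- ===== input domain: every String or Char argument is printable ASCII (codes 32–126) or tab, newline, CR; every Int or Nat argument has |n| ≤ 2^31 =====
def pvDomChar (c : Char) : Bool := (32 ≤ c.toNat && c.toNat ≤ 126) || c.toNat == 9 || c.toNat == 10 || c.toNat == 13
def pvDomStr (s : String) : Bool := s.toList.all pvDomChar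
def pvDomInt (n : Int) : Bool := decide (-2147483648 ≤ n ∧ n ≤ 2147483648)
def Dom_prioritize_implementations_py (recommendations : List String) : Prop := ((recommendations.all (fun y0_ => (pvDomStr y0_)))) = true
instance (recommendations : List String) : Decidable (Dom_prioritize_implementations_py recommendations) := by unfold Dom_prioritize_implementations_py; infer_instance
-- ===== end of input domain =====

-- B replaces A's three-bucket dict accumulation with one stable sort by a 0/1/2 priority rank (simpler; same return value).


-- ===== PORT A =====
def pvHighKw : List String := ["critical", "high", "system", "performance", "efficiency"]
def pvMedKw : List String := ["medium", "optimization", "improvement", "enhancement"]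
def pvLowKw : List String := ["low", "fine-tune", "monitor", "analysis"]

def prioritize_implementations_py (recommendations : List String) : List String :=
  let prioritized : PySem.Dict String (List String) :=
    ((PySem.Dict.empty.insert "high" []).insert "medium" []).insert "low" []
  let prioritized := recommendations.foldl (fun d recommendation =>
    let recommendation_lower := PySem.Str.lower recommendation
    if pvHighKw.any (fun keyword => PySem.Str.isIn keyword recommendation_lower) then
      d.modify "high" [] (· ++ [recommendation])
    else if pvMedKw.any (fun keyword => PySem.Str.isIn keyword recommendation_lower) then
      d.modify "medium" [] (· ++ [recommendation])
    else if pvLowKw.any (fun keyword => PySem.Str.isIn keyword recommendation_lower) then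
      d.modify "low" [] (· ++ [recommendation])
    else
      d.modify "medium" [] (· ++ [recommendation])) prioritized
  prioritized.getD "high" [] ++ prioritized.getD "medium" [] ++ prioritized.getD "low" []

-- ===== PORT B =====
def pvRank (recommendation : String) : Int :=
  let recommendation_lower := PySem.Str.lower recommendation
  if (["critical", "high", "system", "performance", "efficiency"] : List String).any
      (fun keyword => PySem.Str.isIn keyword recommendation_lower) then 0
  else if (["medium", "optimization", "improvement", "enhancement"] : List String).any
      (fun keyword => PySem.Str.isIn keyword recommendation_lower) then 1
  else if (["low", "fine-tune", "monitor", "analysis"] : List String).any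
      (fun keyword => PySem.Str.isIn keyword recommendation_lower) then 2
  else 1

def prioritize_implementations_py_alt (recommendations : List String) : List String :=
  PySem.List.sorted recommendations pvRank

-- ===== PRECONDITION & SPEC =====
def Spec_prioritize_implementations_py (recommendations : List String) (out : List String) : Prop := out = prioritize_implementations_py_alt recommendations
instance (recommendations : List String) (out : List String) : Decidable (Spec_prioritize_implementations_py recommendations out) := by unfold Spec_prioritize_implementations_py; infer_instance

-- ===== CLAIM (what is proved, stated in full; the proofs are below) =====
def Claim_equal_prioritize_implementations_py : Prop := ∀ (recommendations : List String), Dom_prioritize_implementations_py recommendations → Spec_prioritize_implementations_py recommendations (prioritize_implementations_py recommendations)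

-- ===== LEMMAS AND PROOFS =====

lemma pvRank_mem (r : String) : pvRank r = 0 ∨ pvRank r = 1 ∨ pvRank r = 2 := by
  unfold pvRank; dsimp only; split_ifs <;> simp

-- the bucket key A's loop body writes to, expressed through B's rank
def pvBucket (r : String) : String :=
  if pvRank r = 0 then "high" else if pvRank r = 1 then "medium" else "low"

lemma stepA_eq (d : PySem.Dict String (List String)) (r : String) :
    (let recommendation_lower := PySem.Str.lower r
     if pvHighKw.any (fun keyword => PySem.Str.isIn keyword recommendation_lower) then
       d.modify "high" [] (· ++ [r])
     else if pvMedKw.any (fun keyword => PySem.Str.isIn keyword recommendation_lower) then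
       d.modify "medium" [] (· ++ [r])
     else if pvLowKw.any (fun keyword => PySem.Str.isIn keyword recommendation_lower) then
       d.modify "low" [] (· ++ [r])
     else
       d.modify "medium" [] (· ++ [r]))
    = d.modify (pvBucket r) [] (· ++ [r]) := by
  simp only [pvBucket, pvRank, pvHighKw, pvMedKw, pvLowKw]
  split_ifs <;> simp_all

lemma foldA_getD (xs : List String) (d : PySem.Dict String (List String)) (c : String) :
    (xs.foldl (fun d r => d.modify (pvBucket r) [] (· ++ [r])) d).getD c []
      = d.getD c [] ++ xs.filter (fun r => pvBucket r == c) := by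
  have h : xs.foldl (fun d r => d.modify (pvBucket r) [] (· ++ [r])) d
      = (xs.map (fun r => (pvBucket r, r))).foldl (fun d p => d.modify p.1 [] (· ++ [p.2])) d := by
    rw [List.foldl_map]
  rw [h, PySem.Dict.getD_foldl_modify_append]; clear h
  congr 1
  induction xs with
  | nil => rfl
  | cons x xs ih => by_cases hx : pvBucket x == c <;> simp [hx, ih]

lemma pvBucket_eq_iff (r : String) :
    ((pvBucket r == "high") = (pvRank r == 0)) ∧ ((pvBucket r == "medium") = (pvRank r == 1))
      ∧ ((pvBucket r == "low") = (pvRank r == 2)) := by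
  rcases pvRank_mem r with h | h | h <;> simp [pvBucket, h]

lemma A_filters (xs : List String) :
    prioritize_implementations_py xs
      = xs.filter (fun r => pvRank r == 0) ++ xs.filter (fun r => pvRank r == 1)
          ++ xs.filter (fun r => pvRank r == 2) := by
  unfold prioritize_implementations_py
  simp only [funext fun d => funext fun r => stepA_eq d r]
  rw [foldA_getD, foldA_getD, foldA_getD]
  have e1 : xs.filter (fun r => pvBucket r == "high") = xs.filter (fun r => pvRank r == 0) :=
    List.filter_congr (fun r _ => (pvBucket_eq_iff r).1)
  have e2 : xs.filter (fun r => pvBucket r == "medium") = xs.filter (fun r => pvRank r == 1) :=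
    List.filter_congr (fun r _ => (pvBucket_eq_iff r).2.1)
  have e3 : xs.filter (fun r => pvBucket r == "low") = xs.filter (fun r => pvRank r == 2) :=
    List.filter_congr (fun r _ => (pvBucket_eq_iff r).2.2)
  rw [e1, e2, e3]
  norm_num [PySem.Dict.getD_insert, PySem.Dict.getD_empty]

lemma insertBy_append_left (b : String → String → Bool) (x : String) (p q : List String)
    (hp : ∀ y ∈ p, b x y = false) :
    PySem.List.insertBy b x (p ++ q) = p ++ PySem.List.insertBy b x q := by
  induction p with
  | nil => rfl
  | cons y p ih =>
      simp only [List.cons_append, PySem.List.insertBy, hp y (by simp)]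
      simp [ih (fun z hz => hp z (by simp [hz]))]

lemma insertBy_all_before (b : String → String → Bool) (x : String) (q : List String)
    (hq : ∀ y ∈ q, b x y = true) :
    PySem.List.insertBy b x q = x :: q := by
  cases q with
  | nil => rfl
  | cons y q => simp [PySem.List.insertBy, hq y (by simp)]

lemma foldB (xs : List String) (a0 a1 a2 : List String)
    (h0 : ∀ y ∈ a0, pvRank y = 0) (h1 : ∀ y ∈ a1, pvRank y = 1) (h2 : ∀ y ∈ a2, pvRank y = 2) :
    xs.foldl (fun acc x => PySem.List.insertBy (fun a b => decide (pvRank a < pvRank b)) x acc)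
        (a0 ++ a1 ++ a2)
      = (a0 ++ xs.filter (fun r => pvRank r == 0)) ++ (a1 ++ xs.filter (fun r => pvRank r == 1))
          ++ (a2 ++ xs.filter (fun r => pvRank r == 2)) := by
  induction xs generalizing a0 a1 a2 with
  | nil => simp
  | cons x xs ih =>
      simp only [List.foldl_cons]
      rcases pvRank_mem x with hx | hx | hx
      · have step : PySem.List.insertBy (fun a b => decide (pvRank a < pvRank b)) x (a0 ++ a1 ++ a2)
            = (a0 ++ [x]) ++ a1 ++ a2 := by
          rw [List.append_assoc, insertBy_append_left _ _ a0 (a1 ++ a2)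
              (fun y hy => by simp [hx, h0 y hy]),
            insertBy_all_before _ _ (a1 ++ a2) (fun y hy => by
              rcases List.mem_append.1 hy with h | h
              · simp [hx, h1 y h]
              · simp [hx, h2 y h])]
          simp
        rw [step, ih (a0 ++ [x]) a1 a2
          (fun y hy => by rcases List.mem_append.1 hy with h | h
                          · exact h0 y h
                          · simp_all) h1 h2]
        simp [hx, List.append_assoc]
      · have step : PySem.List.insertBy (fun a b => decide (pvRank a < pvRank b)) x (a0 ++ a1 ++ a2)
            = a0 ++ (a1 ++ [x]) ++ a2 := by
          rw [insertBy_append_left _ _ (a0 ++ a1) a2 (fun y hy => by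
              rcases List.mem_append.1 hy with h | h
              · simp [hx, h0 y h]
              · simp [hx, h1 y h]),
            insertBy_all_before _ _ a2 (fun y hy => by simp [hx, h2 y hy])]
          simp
        rw [step, ih a0 (a1 ++ [x]) a2 h0
          (fun y hy => by rcases List.mem_append.1 hy with h | h
                          · exact h1 y h
                          · simp_all) h2]
        simp [hx, List.append_assoc]
      · have step : PySem.List.insertBy (fun a b => decide (pvRank a < pvRank b)) x (a0 ++ a1 ++ a2)
            = a0 ++ a1 ++ (a2 ++ [x]) := by
          rw [PySem.List.insertBy_of_forall_not_before _ _ _ (fun y hy => by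
              rcases List.mem_append.1 hy with h | h
              · rcases List.mem_append.1 h with h' | h'
                · simp [hx, h0 y h']
                · simp [hx, h1 y h']
              · simp [hx, h2 y h])]
          simp
        rw [step, ih a0 a1 (a2 ++ [x]) h0 h1
          (fun y hy => by rcases List.mem_append.1 hy with h | h
                          · exact h2 y h
                          · simp_all)]
        simp [hx, List.append_assoc]

lemma B_filters (xs : List String) :
    prioritize_implementations_py_alt xs
      = xs.filter (fun r => pvRank r == 0) ++ xs.filter (fun r => pvRank r == 1)
          ++ xs.filter (fun r => pvRank r == 2) := by
  unfold prioritize_implementations_py_alt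
  rw [PySem.List.sorted_eq_foldl_insertBy]
  have := foldB xs [] [] [] (by simp) (by simp) (by simp)
  simpa using this

-- ===== VERDICT (by name: the statement is the Claim_ definition above) =====
theorem prioritize_implementations_py_spec : Claim_equal_prioritize_implementations_py := by
  intro xs _
  show prioritize_implementations_py xs = prioritize_implementations_py_alt xs
  rw [A_filters, B_filters]
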